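-- pv_equiv track=rewrite | github.com/minsung8/algorithmProblem_Exercise | longest-repeat-char-replace.py | solution
-- ===== SOURCE A (Python) =====
-- def solution(s, k):
--
--     key_list = []
--     temp_list = []
--
--     for i in s:
--
--         if i not in key_list:
--             key_list.append(i)
--             temp_list.append(s.count(i))
--
--     if len(s) <= max(temp_list) + k:
--         return len(s)
--     return max(temp_list) + k
-- ===== SOURCE B (Python) =====
-- def solution(s, k):
--     # Sort the string so equal characters are adjacent, then scan the runs:
--     # the longest run of the sorted string is the maximum character frequency.
--     t = sorted(s)
--     runs = []
--     while t:
--         c = t[0]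
--         run = 1
--         while run < len(t) and t[run] == c:
--             run += 1
--         runs.append(run)
--         t = t[run:]
--     # max() on the empty run list raises ValueError for empty s, like A.
--     return min(len(s), max(runs) + k)
-- ===== Notes on version B (the rewrite author's own statement) =====
-- stated objective: alternative
-- what changed: Instead of building a first-occurrence key list with a quadratic s.count scan per distinct character, B sorts the string once and scans consecutive runs, taking the longest run as the maximum frequency; the final branch becomes min(len(s), max_run + k).
import Mathlib
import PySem

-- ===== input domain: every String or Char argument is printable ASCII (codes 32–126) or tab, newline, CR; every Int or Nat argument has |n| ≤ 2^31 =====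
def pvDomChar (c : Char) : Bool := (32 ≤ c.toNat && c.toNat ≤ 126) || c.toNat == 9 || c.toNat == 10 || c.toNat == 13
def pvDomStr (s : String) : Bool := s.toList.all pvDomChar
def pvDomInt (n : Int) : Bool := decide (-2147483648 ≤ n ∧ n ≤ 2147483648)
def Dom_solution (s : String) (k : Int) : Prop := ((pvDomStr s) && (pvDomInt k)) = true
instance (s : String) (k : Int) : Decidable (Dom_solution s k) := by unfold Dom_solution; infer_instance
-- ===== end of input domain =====

-- B sorts the string and scans consecutive runs for the maximum character frequency,
-- replacing A's first-occurrence key list with per-character s.count scans (alternative decomposition).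


-- ===== PORT A =====
-- for i in s: if i not in key_list: key_list.append(i); temp_list.append(s.count(i))
-- s.count(i) for a single character i is the character count, ported as List.count.
-- max(temp_list) raises on empty s → PySem.List.max? = none there, excluded by Pre_ (0 is unreachable).
def solution (s : String) (k : Int) : Int :=
  match PySem.List.max?
      (s.toList.foldl
        (fun st i => if i ∈ st.1 then st else (st.1 ++ [i], st.2 ++ [(s.toList.count i : Int)]))
        (([] : List Char), ([] : List Int))).2
      (fun x => x) with
  | none => 0
  | some m => if PySem.Str.len s ≤ m + k then PySem.Str.len s else m + k

-- ===== PORT B =====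
-- the 'while t:' loop of Source B: head c, the inner while counts the run of c
-- (= takeWhile length + 1), then t = t[run:] (= dropWhile).
def runLengths : List Char → List Int
  | [] => []
  | c :: cs =>
    ((cs.takeWhile (fun x => x == c)).length + 1 : Int)
      :: runLengths (cs.dropWhile (fun x => x == c))
termination_by t => t.length
decreasing_by simp; exact List.length_dropWhile_le _ _

def solution_alt (s : String) (k : Int) : Int :=
  match PySem.List.max? (runLengths (PySem.List.sorted s.toList (fun c => c) false))
      (fun x => x) with
  | none => 0  -- unreachable under Pre_: max([]) raises in Python
  | some m => min (PySem.Str.len s) (m + k)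

-- ===== PRECONDITION & SPEC =====
-- Pre_ excludes only the empty string, on which both A and B raise ValueError (max of an empty list).
def Pre_solution (s : String) (k : Int) : Prop := s ≠ ""
instance (s : String) (k : Int) : Decidable (Pre_solution s k) := by unfold Pre_solution; infer_instance
def pvWitness_solution : String × Int := ("AABABBA", 1)
def Spec_solution (s : String) (k : Int) (out : Int) : Prop := out = solution_alt s k
instance (s : String) (k : Int) (out : Int) : Decidable (Spec_solution s k out) := by unfold Spec_solution; infer_instance

-- ===== CLAIM (what is proved, stated in full; the proofs are below) =====
def Claim_equal_solution : Prop := ∀ (s : String) (k : Int), Dom_solution s k → Pre_solution s k → Spec_solution s k (solution s k)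

-- ===== LEMMAS AND PROOFS =====

-- A's loop: key_list is the ordered dedup of s, temp_list maps each key to its count.
lemma solution_fold (l : List Char) (cnt : Char → Int) (ks : List Char) :
    l.foldl (fun st i => if i ∈ st.1 then st else (st.1 ++ [i], st.2 ++ [cnt i]))
      (ks, ks.map cnt)
    = (PySem.Set.update ks l, (PySem.Set.update ks l).map cnt) := by
  induction l generalizing ks with
  | nil => simp [PySem.Set.update]
  | cons c l ih =>
    by_cases hc : c ∈ ks
    · simpa [PySem.Set.update, List.foldl, hc, PySem.Set.add_of_mem hc] using ih ks
    · have : (ks.map cnt) ++ [cnt c] = (ks ++ [c]).map cnt := by simp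
      simp only [List.foldl, if_neg hc, this, PySem.Set.update,
        PySem.Set.add_of_not_mem hc] at *
      exact ih (ks ++ [c])

-- run lengths of a sorted list are exactly the character counts of its members
lemma mem_runLengths_aux (n : Nat) : ∀ (t : List Char), t.length ≤ n →
    t.Pairwise (· ≤ ·) → ∀ x : Int,
    (x ∈ runLengths t ↔ ∃ c ∈ t, x = (t.count c : Int)) := by
  induction n with
  | zero =>
    intro t hlen _ x
    rw [List.length_eq_zero_iff.mp (Nat.le_zero.mp hlen)]
    simp [runLengths]
  | succ n ih =>
    intro t hlen hs x
    match t with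
    | [] => simp [runLengths]
    | c :: cs =>
    have hcs : cs.Pairwise (· ≤ ·) := (List.pairwise_cons.mp hs).2
    have hle : ∀ y ∈ cs, c ≤ y := (List.pairwise_cons.mp hs).1
    have hsplit : cs = cs.takeWhile (fun x => x == c) ++ cs.dropWhile (fun x => x == c) :=
      (List.takeWhile_append_dropWhile).symm
    have hrest : (cs.dropWhile (fun x => x == c)).Pairwise (· ≤ ·) :=
      hcs.sublist (List.dropWhile_sublist _)
    have hrlen : (cs.dropWhile (fun x => x == c)).length ≤ n := by
      have := List.length_dropWhile_le (fun x => x == c) cs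
      simp at hlen; omega
    have htw : ∀ y ∈ cs.takeWhile (fun x => x == c), y = c := by
      intro y hy
      have := List.mem_takeWhile_imp hy
      simpa using this
    -- c does not occur in the dropped rest
    have hcnot : c ∉ cs.dropWhile (fun x => x == c) := by
      intro hmem
      cases hrd : cs.dropWhile (fun x => x == c) with
      | nil => simp [hrd] at hmem
      | cons d rest =>
        have hd : ¬ (d == c) = true := by
          have := List.head?_dropWhile_not (p := fun x => x == c) (l := cs)
          rw [hrd] at this; simpa using this
        have hdc : d ≠ c := by simpa using hd
        rw [hrd] at hmem
        rcases List.mem_cons.mp hmem with h | h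
        · exact hdc h.symm
        · -- c ∈ rest, but d ≤ c (pairwise) and c ≤ d (hle) force d = c
          have hdrest : (d :: rest).Pairwise (· ≤ ·) := by rw [hrd] at hrest; exact hrest
          have h1 : d ≤ c := (List.pairwise_cons.mp hdrest).1 c h
          have h2 : c ≤ d := hle d (by rw [hsplit, hrd]; simp)
          exact hdc (le_antisymm h1 h2)
    -- counts
    have hcount_c : (c :: cs).count c
        = (cs.takeWhile (fun x => x == c)).length + 1 := by
      rw [List.count_cons_self]
      conv_lhs => rw [hsplit]
      rw [List.count_append]
      have h1 : (cs.takeWhile (fun x => x == c)).count c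
          = (cs.takeWhile (fun x => x == c)).length :=
        List.count_eq_length.mpr (fun y hy => by simp [htw y hy])
      have h2 : (cs.dropWhile (fun x => x == c)).count c = 0 :=
        List.count_eq_zero.mpr hcnot
      omega
    have hcount_rest : ∀ c' ∈ cs.dropWhile (fun x => x == c),
        (c :: cs).count c' = (cs.dropWhile (fun x => x == c)).count c' := by
      intro c' hc'
      have hne : c' ≠ c := fun h => hcnot (h ▸ hc')
      rw [List.count_cons_of_ne hne.symm]
      conv_lhs => rw [hsplit]
      rw [List.count_append]
      have h1 : (cs.takeWhile (fun x => x == c)).count c' = 0 :=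
        List.count_eq_zero.mpr (fun h => hne (htw c' h))
      omega
    rw [runLengths]
    constructor
    · intro hx
      rcases List.mem_cons.mp hx with h | h
      · exact ⟨c, by simp, by rw [h, hcount_c]; push_cast; ring⟩
      · rcases (ih _ hrlen hrest x).mp h with ⟨c', hc', hx'⟩
        refine ⟨c', List.mem_cons_of_mem c (List.Sublist.mem hc' (List.dropWhile_sublist _)), ?_⟩
        rw [hx', hcount_rest c' hc']
    · rintro ⟨c0, hc0, hx⟩
      by_cases h0 : c0 = c
      · subst h0; rw [hx, hcount_c]; left
      · have hc0cs : c0 ∈ cs := by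
          rcases List.mem_cons.mp hc0 with h | h
          · exact absurd h h0
          · exact h
        have hc0rest : c0 ∈ cs.dropWhile (fun x => x == c) := by
          rw [hsplit] at hc0cs
          rcases List.mem_append.mp hc0cs with h | h
          · exact absurd (htw c0 h) h0
          · exact h
        right
        rw [hx, hcount_rest c0 hc0rest]
        exact (ih _ hrlen hrest _).mpr ⟨c0, hc0rest, rfl⟩

lemma mem_runLengths (t : List Char) (hs : t.Pairwise (· ≤ ·)) (x : Int) :
    x ∈ runLengths t ↔ ∃ c ∈ t, x = (t.count c : Int) :=
  mem_runLengths_aux t.length t le_rfl hs x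

-- two nonempty Int lists with the same elements have the same Python max
lemma max?_eq_of_same_mem (xs ys : List Int) (hx : xs ≠ []) (hy : ys ≠ [])
    (h : ∀ v, v ∈ xs ↔ v ∈ ys) :
    PySem.List.max? xs (fun x => x) = PySem.List.max? ys (fun x => x) := by
  rcases Option.ne_none_iff_exists'.mp
    (fun hn => hx ((PySem.List.max?_eq_none_iff xs (fun x : Int => x)).mp hn)) with ⟨a, ha⟩
  rcases Option.ne_none_iff_exists'.mp
    (fun hn => hy ((PySem.List.max?_eq_none_iff ys (fun x : Int => x)).mp hn)) with ⟨b, hb⟩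
  rw [ha, hb]
  have hab : a ≤ b := PySem.List.max?_isMax hb a ((h a).mp (PySem.List.max?_mem ha))
  have hba : b ≤ a := PySem.List.max?_isMax ha b ((h b).mpr (PySem.List.max?_mem hb))
  rw [le_antisymm hab hba]

-- ===== VERDICT (by name: the statement is the Claim_ definition above) =====
theorem solution_spec : Claim_equal_solution := by
  intro s k _ hpre
  unfold Spec_solution solution solution_alt
  have hl : s.toList ≠ [] := by
    intro h
    exact hpre (by rwa [← String.toList_eq_nil_iff] )
  set l := s.toList with hldef
  set t := PySem.List.sorted l (fun c => c) false with htdef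
  have hperm : t.Perm l := PySem.List.sorted_perm l _ _
  have ht : t ≠ [] := by
    intro h
    exact hl (List.Perm.eq_nil (h ▸ hperm.symm))
  have hsorted : t.Pairwise (· ≤ ·) := by
    simpa using PySem.List.sorted_pairwise l (fun c : Char => c) (κ := Char)
  -- A's accumulated temp_list
  have hfold := solution_fold l (fun c => (l.count c : Int)) []
  simp only [List.map_nil] at hfold
  rw [hfold]
  have hupd : PySem.Set.update [] l = PySem.Set.ofList l := rfl
  rw [hupd]
  -- same elements on both sides of max
  have hmem : ∀ v, v ∈ (PySem.Set.ofList l).map (fun c => (l.count c : Int))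
      ↔ v ∈ runLengths t := by
    intro v
    rw [mem_runLengths t hsorted v]
    simp only [List.mem_map, PySem.Set.mem_ofList _ _]
    constructor
    · rintro ⟨c, hc, rfl⟩
      exact ⟨c, hperm.mem_iff.mpr hc, by rw [hperm.count_eq]⟩
    · rintro ⟨c, hc, rfl⟩
      exact ⟨c, hperm.mem_iff.mp hc, by rw [hperm.count_eq]⟩
  have hxne : (PySem.Set.ofList l).map (fun c => (l.count c : Int)) ≠ [] := by
    simp only [ne_eq, List.map_eq_nil_iff]
    intro h
    rcases List.exists_mem_of_ne_nil l hl with ⟨a, ha⟩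
    have : a ∈ PySem.Set.ofList l := (PySem.Set.mem_ofList _ _).mpr ha
    simp [h] at this
  have hyne : runLengths t ≠ [] := by
    cases ht' : t with
    | nil => exact absurd ht' ht
    | cons c cs => simp [runLengths]
  rw [max?_eq_of_same_mem _ _ hxne hyne hmem]
  cases hm : PySem.List.max? (runLengths t) (fun x => x) with
  | none => rfl
  | some m =>
    simp only []
    by_cases h : PySem.Str.len s ≤ m + k
    · rw [if_pos h, min_eq_left h]
    · rw [if_neg h, min_eq_right (le_of_not_ge h)]
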